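-- pv_equiv track=rewrite | github.com/sunpeil/ieeextreme15 | expressionevaluation.py | isnotinvalid
-- ===== SOURCE A (Python) =====
-- def for_find_jian(l,i):
--     if i < 0:
--         return False
--     try:
--         x = int(l[i])
--         return True
--     except ValueError:
--         if l[i] == '+' or l[i] == '*' or l[i] == '-':
--             return False
--         else:
--             flag = True
--             return for_find_jian(l, i-1)
--
-- def for_find_jia(l,i,flag):
--     if i < 0:
--         return False
--     try:
--         x = int(l[i])
--         return True
--     except ValueError:
--         if flag == False:
--             if l[i] == '+' or l[i] == '*' or l[i] == '-':
--                 return False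
--             else:
--                 if l[i] == '(':
--                     flag = True
--                 return for_find_jia(l, i - 1, flag)
--         else:
--             if l[i] == '+' or l[i] == '-':
--                 return False
--             else:
--                 if l[i] == '(':
--                     flag = True
--                 return for_find_jia(l, i - 1, flag)
--
-- def for_find_cheng(l,i):
--     if i < 0:
--         return False
--     try:
--         x = int(l[i])
--         return True
--     except ValueError:
--         if l[i] == '+' or l[i] == '*' or l[i] == '-':
--             return False
--         else:
--             flag = True
--             return for_find_cheng(l, i - 1)
--
-- def isnotinvalid(list):
--     for i in range(len(list)):
--         flag = False
--         if list[i] == '-':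
--             if not for_find_jian(list,i-1):
--                 return False
--         elif list[i] == '+':
--             if not for_find_jia(list,i-1,flag):
--                 return False
--         elif list[i] == '*':
--             if not for_find_cheng(list,i-1):
--                 return False
--     return True
-- ===== SOURCE B (Python) =====
-- def isnotinvalid(list):
--     # One forward pass keeping, for the prefix seen so far, the answers of the
--     # three backward scans A performs: jian = "nearest preceding int/op token is
--     # an int" (also answers the '*' scan), jia / jiaflag = the '+' scan with its
--     # flag initially False / already True.  int-ness of each distinct token is
--     # computed once and memoized.
--     jian = jia = jiaflag = False
--     isint = {}
--     for t in list:
--         if t == '-':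
--             if not jian:
--                 return False
--             jian = jia = jiaflag = False
--         elif t == '+':
--             if not jia:
--                 return False
--             jian = jia = jiaflag = False
--         elif t == '*':
--             if not jian:
--                 return False
--             jian = jia = False
--         elif t == '(':
--             jia = jiaflag
--         else:
--             c = isint.get(t)
--             if c is None:
--                 try:
--                     int(t)
--                     c = True
--                 except ValueError:
--                     c = False
--                 isint[t] = c
--             if c:
--                 jian = jia = jiaflag = True
--     return True
-- ===== Notes on version B (the rewrite author's own statement) =====
-- stated objective: alternative
-- what changed: Replaced A's per-operator backward rescans (for_find_jian/jia/cheng restarted at every '+','-','*') with a single forward pass that maintains the three backward-scan answers as booleans, memoizing int-parseability per distinct token; O(n^2) worst case becomes O(n), though on operator-free inputs A is already linear and B is not measurably faster there.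
import Mathlib
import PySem

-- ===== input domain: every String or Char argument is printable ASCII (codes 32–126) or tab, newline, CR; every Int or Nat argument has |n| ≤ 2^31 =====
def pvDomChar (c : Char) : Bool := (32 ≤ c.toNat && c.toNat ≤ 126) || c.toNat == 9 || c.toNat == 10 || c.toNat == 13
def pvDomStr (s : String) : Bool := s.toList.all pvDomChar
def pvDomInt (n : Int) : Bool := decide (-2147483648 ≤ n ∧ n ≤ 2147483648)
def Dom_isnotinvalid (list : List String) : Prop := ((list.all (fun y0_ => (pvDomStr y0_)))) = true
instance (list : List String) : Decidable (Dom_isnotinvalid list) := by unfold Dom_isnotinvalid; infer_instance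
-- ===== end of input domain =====

-- B replaces A's per-operator backward rescans by ONE forward pass that maintains
-- the three backward-scan answers as booleans (int-ness of distinct tokens memoized).

-- ===== PORT A =====
-- for_find_jian(l, i): backward scan; int token -> True, '+','*','-' -> False, else skip.
-- fuel = (i+1).toNat counts the exact number of remaining steps (i decreases by 1 each call).
def forFindJianGo (l : List String) : Nat -> Int -> Bool
  | 0, _ => false            -- only reached with i < 0
  | fuel + 1, i =>
    if i < 0 then false
    else
      match PySem.List.pyGet? l i with
      | none => false        -- IndexError; unreachable from isnotinvalid's calls (i < len always)
      | some t =>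
        if (PySem.Int.ofStr? t).isSome then true
        else if t == "+" || t == "*" || t == "-" then false
        else forFindJianGo l fuel (i - 1)

def forFindJian (l : List String) (i : Int) : Bool := forFindJianGo l (i + 1).toNat i

-- for_find_jia(l, i, flag): as above, but '(' sets flag, and with flag set '*' no longer blocks.
def forFindJiaGo (l : List String) : Nat -> Int -> Bool -> Bool
  | 0, _, _ => false
  | fuel + 1, i, flag =>
    if i < 0 then false
    else
      match PySem.List.pyGet? l i with
      | none => false        -- IndexError; unreachable from isnotinvalid's calls
      | some t =>
        if (PySem.Int.ofStr? t).isSome then true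
        else if flag == false then
          if t == "+" || t == "*" || t == "-" then false
          else forFindJiaGo l fuel (i - 1) (if t == "(" then true else flag)
        else
          if t == "+" || t == "-" then false
          else forFindJiaGo l fuel (i - 1) (if t == "(" then true else flag)

def forFindJia (l : List String) (i : Int) (flag : Bool) : Bool := forFindJiaGo l (i + 1).toNat i flag

-- for_find_cheng(l, i): duplicated in the Python source, kept duplicated here.
def forFindChengGo (l : List String) : Nat -> Int -> Bool
  | 0, _ => false
  | fuel + 1, i =>
    if i < 0 then false
    else
      match PySem.List.pyGet? l i with
      | none => false        -- IndexError; unreachable from isnotinvalid's calls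
      | some t =>
        if (PySem.Int.ofStr? t).isSome then true
        else if t == "+" || t == "*" || t == "-" then false
        else forFindChengGo l fuel (i - 1)

def forFindCheng (l : List String) (i : Int) : Bool := forFindChengGo l (i + 1).toNat i

-- the 'for i in range(len(list))' loop with its early returns; fuel = l.length - i
def isLoopGo (l : List String) : Nat -> Nat -> Bool
  | 0, _ => true             -- only reached with i >= len: loop ends, return True
  | fuel + 1, i =>
    if h : i < l.length then
      let t := l[i]
      if t == "-" then
        if !forFindJian l ((i : Int) - 1) then false else isLoopGo l fuel (i + 1)
      else if t == "+" then
        if !forFindJia l ((i : Int) - 1) false then false else isLoopGo l fuel (i + 1)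
      else if t == "*" then
        if !forFindCheng l ((i : Int) - 1) then false else isLoopGo l fuel (i + 1)
      else isLoopGo l fuel (i + 1)
    else true

def isnotinvalid (list : List String) : Bool := isLoopGo list list.length 0

-- ===== PORT B =====
-- one forward pass: jian/jia/jiaflag are the answers A's three backward scans would
-- give at the current position; memo caches int-parseability per distinct token
def altLoop (ts : List String) (jian jia jiaflag : Bool) (memo : PySem.Dict String Bool) : Bool :=
  match ts with
  | [] => true
  | t :: rest =>
    if t == "-" then
      if !jian then false else altLoop rest false false false memo
    else if t == "+" then
      if !jia then false else altLoop rest false false false memo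
    else if t == "*" then
      if !jian then false else altLoop rest false false jiaflag memo
    else if t == "(" then
      altLoop rest jian jiaflag jiaflag memo
    else
      match memo.get? t with
      | some c =>
        if c then altLoop rest true true true memo else altLoop rest jian jia jiaflag memo
      | none =>
        let c := (PySem.Int.ofStr? t).isSome
        if c then altLoop rest true true true (memo.insert t c)
        else altLoop rest jian jia jiaflag (memo.insert t c)

def isnotinvalid_alt (list : List String) : Bool := altLoop list false false false PySem.Dict.empty

-- ===== PRECONDITION & SPEC =====
def Spec_isnotinvalid (list : List String) (out : Bool) : Prop := out = isnotinvalid_alt list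
instance (list : List String) (out : Bool) : Decidable (Spec_isnotinvalid list out) := by unfold Spec_isnotinvalid; infer_instance

-- ===== CLAIM (what is proved, stated in full; the proofs are below) =====
def Claim_equal_isnotinvalid : Prop := ∀ (list : List String), Dom_isnotinvalid list → Spec_isnotinvalid list (isnotinvalid list)

-- ===== LEMMAS AND PROOFS =====

lemma chengGo_eq_jianGo (l : List String) (fuel : Nat) : ∀ i, forFindChengGo l fuel i = forFindJianGo l fuel i := by
  induction fuel with
  | zero => intro i; rfl
  | succ n ih =>
    intro i
    simp only [forFindChengGo, forFindJianGo]
    cases PySem.List.pyGet? l i <;> simp [ih]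

lemma cheng_eq_jian (l : List String) (i : Int) : forFindCheng l i = forFindJian l i :=
  chengGo_eq_jianGo l _ i

lemma jian_succ (l : List String) (i : Nat) (h : i < l.length) :
    forFindJian l (i : Int) =
      (if (PySem.Int.ofStr? l[i]).isSome then true
       else if l[i] == "+" || l[i] == "*" || l[i] == "-" then false
       else forFindJian l ((i : Int) - 1)) := by
  have h1 : ((i : Int) + 1).toNat = i + 1 := by omega
  have h2 : ((i : Int) - 1 + 1).toNat = i := by omega
  simp only [forFindJian]
  rw [h1, h2]
  simp [forFindJianGo, PySem.List.pyGet?_natCast, List.getElem?_eq_getElem h]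

lemma jia_succ (l : List String) (i : Nat) (h : i < l.length) (flag : Bool) :
    forFindJia l (i : Int) flag =
      (if (PySem.Int.ofStr? l[i]).isSome then true
       else if flag == false then
         if l[i] == "+" || l[i] == "*" || l[i] == "-" then false
         else forFindJia l ((i : Int) - 1) (if l[i] == "(" then true else flag)
       else
         if l[i] == "+" || l[i] == "-" then false
         else forFindJia l ((i : Int) - 1) (if l[i] == "(" then true else flag)) := by
  have h1 : ((i : Int) + 1).toNat = i + 1 := by omega
  have h2 : ((i : Int) - 1 + 1).toNat = i := by omega
  simp only [forFindJia]
  rw [h1, h2]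
  simp [forFindJiaGo, PySem.List.pyGet?_natCast, List.getElem?_eq_getElem h]

lemma main_inv (n : Nat) : ∀ (l : List String) (i : Nat) (memo : PySem.Dict String Bool),
    l.length - i = n →
    (∀ k c, memo.get? k = some c → c = (PySem.Int.ofStr? k).isSome) →
    isLoopGo l n i = altLoop (l.drop i)
      (forFindJian l ((i : Int) - 1))
      (forFindJia l ((i : Int) - 1) false)
      (forFindJia l ((i : Int) - 1) true) memo := by
  induction n with
  | zero =>
    intro l i memo hn _
    simp [isLoopGo, List.drop_eq_nil_of_le (by omega : l.length ≤ i), altLoop]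
  | succ m ih =>
    intro l i memo hn hinv
    have h : i < l.length := by omega
    have hdrop : l.drop i = l[i] :: l.drop (i + 1) := List.drop_eq_getElem_cons h
    have hcast : ((i : Nat) + 1 : Int) - 1 = (i : Int) := by ring
    have hih : ∀ (memo' : PySem.Dict String Bool),
        (∀ k c, memo'.get? k = some c → c = (PySem.Int.ofStr? k).isSome) →
        isLoopGo l m (i + 1) = altLoop (l.drop (i + 1))
          (forFindJian l (i : Int)) (forFindJia l (i : Int) false)
          (forFindJia l (i : Int) true) memo' := by
      intro memo' hm
      have := ih l (i + 1) memo' (by omega) hm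
      rwa [Nat.cast_add, Nat.cast_one, hcast] at this
    simp only [jian_succ l i h, jia_succ l i h false, jia_succ l i h true] at hih
    have hneg : PySem.Int.ofStr? "-" = none := by decide
    have hplus : PySem.Int.ofStr? "+" = none := by decide
    have hstar : PySem.Int.ofStr? "*" = none := by decide
    have hparen : PySem.Int.ofStr? "(" = none := by decide
    rw [isLoopGo, dif_pos h, hdrop, altLoop, cheng_eq_jian]
    by_cases h1 : l[i] = "-"
    · rw [hih memo hinv]; simp [h1, hneg]
    · by_cases h2 : l[i] = "+"
      · rw [hih memo hinv]; simp [h2, hplus]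
      · by_cases h3 : l[i] = "*"
        · rw [hih memo hinv]; simp [h3, hstar]
        · by_cases h4 : l[i] = "("
          · rw [hih memo hinv]; simp [h4, hparen]
          · rcases hm : memo.get? l[i] with _ | c
            · have hinv' : ∀ k c,
                  (memo.insert l[i] ((PySem.Int.ofStr? l[i]).isSome)).get? k = some c →
                  c = (PySem.Int.ofStr? k).isSome := by
                intro k c hk
                rw [PySem.Dict.get?_insert] at hk
                by_cases hkk : k = l[i]
                · rw [if_pos hkk] at hk
                  cases hk; rw [hkk]
                · rw [if_neg hkk] at hk
                  exact hinv k c hk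
              rw [hih _ hinv']
              by_cases hInt : (PySem.Int.ofStr? l[i]).isSome = true <;>
                simp [h1, h2, h3, h4, hInt]
            · have hc := hinv _ _ hm
              subst hc
              rw [hih memo hinv]
              by_cases hInt : (PySem.Int.ofStr? l[i]).isSome = true <;>
                simp [h1, h2, h3, h4, hInt]

-- ===== VERDICT (by name: the statement is the Claim_ definition above) =====
theorem isnotinvalid_spec : Claim_equal_isnotinvalid := by
  intro list _
  unfold Spec_isnotinvalid isnotinvalid isnotinvalid_alt
  exact main_inv list.length list 0 PySem.Dict.empty (by omega)
    (by intro k c hk; simp [PySem.Dict.get?, PySem.Dict.empty] at hk)
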